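-- pv_equiv track=rewrite | github.com/marionoro/CSCI-1133 | exam2/othello.py | placements
-- ===== SOURCE A (Python) =====
-- def findopponentneighbors(board, row, col, color):
--     opponenttokens = []
--     if color == 1:
--         opposite = 2
--     else:
--         opposite = 1
--     for i in range(max(0,row-1), min(row+2, len(board))):
--         for j in range(max(0,col-1), min(col+2, len(board))):
--             if board[i][j] == opposite:
--                 opponenttokens.append((i, j, i - row, j - col))
--     return opponenttokens
--
-- def findsamecolorinline(board, row, col, color):
--     if color == 1:
--         opposite = 2
--     else:
--         opposite = 1
--     tokens = []
--     neighbors = findopponentneighbors(board, row, col, color)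
--     for m in range(len(neighbors)):
--         z = opposite
--         x1 = neighbors[m][0]
--         y1 = neighbors[m][1]
--         while z == opposite and x1 in range(len(board)) and y1 in range(len(board)):
--             z = board[x1][y1]
--             if z == color:
--                 tokens.append((x1, y1))
--             x1 += neighbors[m][2]
--             y1 += neighbors[m][3]
--     return tokens
--
-- def placements(board, row, col, color):
--     mylist = [(row,col)]
--     tokens = findsamecolorinline(board, row, col, color)
--     for i in range(len(tokens)):
--         xdif = tokens[i][0] - row
--         ydif = tokens[i][1] - col
--         xchange = int(xdif / max(abs(xdif), abs(ydif)))
--         ychange = int(ydif / max(abs(xdif), abs(ydif)))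
--         a = row + xchange
--         b = col + ychange
--         for i in range(max(abs(xdif),abs(ydif))-1):
--             mylist.append((a,b))
--             a += xchange
--             b += ychange
--     return mylist
-- ===== SOURCE B (Python) =====
-- # Single pass over the 8 direction offsets: walk each ray once, collecting the
-- # opponent cells directly, instead of A's three-stage pipeline (neighbor list,
-- # endpoint tokens, reconstruction of the ray by division).
-- OFFSETS = [(-1, -1), (-1, 0), (-1, 1), (0, -1), (0, 1), (1, -1), (1, 0), (1, 1)]
--
-- def placements(board, row, col, color):
--     n = len(board)
--     opposite = 2 if color == 1 else 1
--     result = [(row, col)]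
--     for di, dj in OFFSETS:
--         i, j = row + di, col + dj
--         flips = []
--         while 0 <= i < n and 0 <= j < n and board[i][j] == opposite:
--             flips.append((i, j))
--             i += di
--             j += dj
--         if 0 <= i < n and 0 <= j < n and board[i][j] == color:
--             result += flips
--     return result
-- ===== Notes on version B (the rewrite author's own statement) =====
-- stated objective: simpler
-- what changed: B replaces A's three-stage pipeline (3x3 neighbor scan, walking each ray to record an endpoint token, then reconstructing the ray's cells from the token via abs/max/division) with a single loop over the 8 direction offsets that walks each ray once, collecting the flipped opponent cells directly.
-- outside the precondition, e.g. on placements([[0, 0, 0, 0], [2, 0, 0, 0], [7, 0, 0, 0], []], 0, 0, 1): A returns [(0, 0)], B returns [(0, 0)]; on placements([[2]], 0, 0, 1): A does not finish within the time limit, B returns [(0, 0)]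
import Mathlib
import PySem

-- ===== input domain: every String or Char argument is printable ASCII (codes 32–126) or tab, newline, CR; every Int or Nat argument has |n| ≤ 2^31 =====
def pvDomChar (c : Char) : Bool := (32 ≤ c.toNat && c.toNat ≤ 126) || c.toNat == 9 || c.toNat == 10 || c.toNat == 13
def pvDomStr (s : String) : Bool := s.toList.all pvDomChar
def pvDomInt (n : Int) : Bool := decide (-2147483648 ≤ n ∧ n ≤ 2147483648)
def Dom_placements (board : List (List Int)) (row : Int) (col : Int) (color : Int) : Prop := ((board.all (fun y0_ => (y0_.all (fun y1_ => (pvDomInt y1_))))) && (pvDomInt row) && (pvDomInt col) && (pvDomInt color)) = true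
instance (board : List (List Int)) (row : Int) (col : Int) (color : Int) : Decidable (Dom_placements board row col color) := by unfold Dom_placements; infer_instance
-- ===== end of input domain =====

-- B replaces A's three-stage pipeline (neighbor scan, endpoint tokens, ray reconstruction by
-- division) with one walk per direction offset that collects the flipped cells directly.

-- board[i][j]; every read the Pythons perform under Pre_ is in range, so the defaults are never used
def cellAt (board : List (List Int)) (i j : Int) : Int :=
  PySem.List.pyGetD (PySem.List.pyGetD board i []) j 0

-- ===== PORT A =====
def findopponentneighbors (board : List (List Int)) (row col color : Int) :
    List (Int × Int × Int × Int) :=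
  let opposite := if color = 1 then 2 else 1
  (PySem.List.pyRange (max 0 (row - 1)) (min (row + 2) (board.length : Int)) 1).foldl
    (fun acc i =>
      (PySem.List.pyRange (max 0 (col - 1)) (min (col + 2) (board.length : Int)) 1).foldl
        (fun acc2 j =>
          if cellAt board i j = opposite then acc2 ++ [(i, j, i - row, j - col)] else acc2)
        acc)
    []

-- the while loop of findsamecolorinline; it advances one cell per iteration along a
-- direction that is nonzero under Pre_, so fuel board.length + 1 never runs out there
def whileA (board : List (List Int)) (color opposite di dj : Int) :
    Nat → Int → Int → Int → List (Int × Int) → List (Int × Int)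
  | 0, _, _, _, tokens => tokens
  | fuel + 1, z, x1, y1, tokens =>
    if z = opposite ∧ 0 ≤ x1 ∧ x1 < (board.length : Int) ∧ 0 ≤ y1 ∧ y1 < (board.length : Int) then
      let z2 := cellAt board x1 y1
      let tokens2 := if z2 = color then tokens ++ [(x1, y1)] else tokens
      whileA board color opposite di dj fuel z2 (x1 + di) (y1 + dj) tokens2
    else tokens

def findsamecolorinline (board : List (List Int)) (row col color : Int) : List (Int × Int) :=
  let opposite := if color = 1 then 2 else 1
  let neighbors := findopponentneighbors board row col color
  (PySem.List.pyRange 0 (neighbors.length : Int) 1).foldl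
    (fun tokens m =>
      let nb := PySem.List.pyGetD neighbors m (0, 0, 0, 0)
      whileA board color opposite nb.2.2.1 nb.2.2.2 (board.length + 1) opposite nb.1 nb.2.1 tokens)
    []

def placements (board : List (List Int)) (row : Int) (col : Int) (color : Int) : List (Int × Int) :=
  let tokens := findsamecolorinline board row col color
  (PySem.List.pyRange 0 (tokens.length : Int) 1).foldl
    (fun mylist i =>
      let t := PySem.List.pyGetD tokens i (0, 0)
      let xdif := t.1 - row
      let ydif := t.2 - col
      -- int(xdif / max(...)): float division then truncation; exact here because the token
      -- lies on the ray through (row, col), so the divisor divides xdif and ydif evenly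
      let xchange := Int.tdiv xdif (max |xdif| |ydif|)
      let ychange := Int.tdiv ydif (max |xdif| |ydif|)
      ((PySem.List.pyRange 0 (max |xdif| |ydif| - 1) 1).foldl
          (fun (st : Int × Int × List (Int × Int)) _ =>
            (st.1 + xchange, st.2.1 + ychange, st.2.2 ++ [(st.1, st.2.1)]))
          (row + xchange, col + ychange, mylist)).2.2)
    [(row, col)]

-- ===== PORT B =====
def offsetsB : List (Int × Int) :=
  [(-1, -1), (-1, 0), (-1, 1), (0, -1), (0, 1), (1, -1), (1, 0), (1, 1)]

-- B's while loop: one step per iteration along a nonzero offset, so fuel board.length + 1 suffices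
def walkB (board : List (List Int)) (opposite di dj : Int) :
    Nat → Int → Int → List (Int × Int) → List (Int × Int) × Int × Int
  | 0, i, j, flips => (flips, i, j)
  | fuel + 1, i, j, flips =>
    if (0 ≤ i ∧ i < (board.length : Int) ∧ 0 ≤ j ∧ j < (board.length : Int)) ∧
        cellAt board i j = opposite then
      walkB board opposite di dj fuel (i + di) (j + dj) (flips ++ [(i, j)])
    else (flips, i, j)

def placements_alt (board : List (List Int)) (row : Int) (col : Int) (color : Int) :
    List (Int × Int) :=
  let opposite := if color = 1 then 2 else 1
  offsetsB.foldl
    (fun result d =>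
      let r := walkB board opposite d.1 d.2 (board.length + 1) (row + d.1) (col + d.2) []
      if (0 ≤ r.2.1 ∧ r.2.1 < (board.length : Int) ∧ 0 ≤ r.2.2 ∧ r.2.2 < (board.length : Int)) ∧
          cellAt board r.2.1 r.2.2 = color then
        result ++ r.1
      else result)
    [(row, col)]

-- ===== PRECONDITION & SPEC =====
-- Pre_ excludes (1) positions where board[row][col] holds the opponent color, on which A's
-- center (0,0) direction loops forever, and (2) inputs on which A's square-bounds indexing
-- raises IndexError because a row is shorter than the board height: every cell the 3x3 scan
-- reads and every in-bounds cell on a ray A walks must exist (slightly wider than the cells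
-- actually read: a ray is demanded whole even past the cell where the walk stops, see cites).
def Pre_placements (board : List (List Int)) (row : Int) (col : Int) (color : Int) : Prop :=
  ¬(0 ≤ row ∧ row < (board.length : Int) ∧ 0 ≤ col ∧ col < (board.length : Int) ∧
      cellAt board row col = (if color = 1 then 2 else 1)) ∧
  (∀ i ∈ PySem.List.pyRange (max 0 (row - 1)) (min (row + 2) (board.length : Int)) 1,
    ∀ j ∈ PySem.List.pyRange (max 0 (col - 1)) (min (col + 2) (board.length : Int)) 1,
      j < ((PySem.List.pyGetD board i []).length : Int)) ∧
  (∀ d ∈ ([(-1, -1), (-1, 0), (-1, 1), (0, -1), (0, 1), (1, -1), (1, 0), (1, 1)] :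
      List (Int × Int)),
    (0 ≤ row + d.1 ∧ row + d.1 < (board.length : Int) ∧ 0 ≤ col + d.2 ∧
        col + d.2 < (board.length : Int) ∧
        cellAt board (row + d.1) (col + d.2) = (if color = 1 then 2 else 1)) →
    ∀ k ∈ PySem.List.pyRange 1 ((board.length : Int) + 1) 1,
      (0 ≤ row + k * d.1 ∧ row + k * d.1 < (board.length : Int) ∧
        0 ≤ col + k * d.2 ∧ col + k * d.2 < (board.length : Int)) →
      col + k * d.2 < ((PySem.List.pyGetD board (row + k * d.1) []).length : Int))
instance (board : List (List Int)) (row : Int) (col : Int) (color : Int) :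
    Decidable (Pre_placements board row col color) := by unfold Pre_placements; infer_instance

def pvWitness_placements : List (List Int) × Int × Int × Int := ([[0, 2, 1], [0, 0, 0], [0, 0, 0]], 0, 0, 1)

def Spec_placements (board : List (List Int)) (row : Int) (col : Int) (color : Int) (out : List (Int × Int)) : Prop := out = placements_alt board row col color
instance (board : List (List Int)) (row : Int) (col : Int) (color : Int) (out : List (Int × Int)) : Decidable (Spec_placements board row col color out) := by unfold Spec_placements; infer_instance

-- ===== CLAIM (what is proved, stated in full; the proofs are below) =====
def Claim_equal_placements : Prop := ∀ (board : List (List Int)) (row : Int) (col : Int) (color : Int), Dom_placements board row col color → Pre_placements board row col color → Spec_placements board row col color (placements board row col color)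

-- ===== LEMMAS AND PROOFS =====

-- number of consecutive opponent cells along the ray from (x, y)
def stopAt (board : List (List Int)) (opposite di dj : Int) : Nat → Int → Int → Nat
  | 0, _, _ => 0
  | fuel + 1, x, y =>
    if (0 ≤ x ∧ x < (board.length : Int) ∧ 0 ≤ y ∧ y < (board.length : Int)) ∧
        cellAt board x y = opposite then
      stopAt board opposite di dj fuel (x + di) (y + dj) + 1
    else 0

-- the token A records at a ray's endpoint
def tokIf (board : List (List Int)) (color ex ey : Int) : List (Int × Int) :=
  if (0 ≤ ex ∧ ex < (board.length : Int) ∧ 0 ≤ ey ∧ ey < (board.length : Int)) ∧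
      cellAt board ex ey = color then [(ex, ey)] else []

-- the cells A's expansion loop rebuilds from a token
def expandE (row col : Int) (t : Int × Int) : List (Int × Int) :=
  let xdif := t.1 - row
  let ydif := t.2 - col
  let xchange := Int.tdiv xdif (max |xdif| |ydif|)
  let ychange := Int.tdiv ydif (max |xdif| |ydif|)
  (List.range (max |xdif| |ydif| - 1).toNat).map
    (fun k : Nat => (row + xchange + (k : Int) * xchange, col + ychange + (k : Int) * ychange))

theorem innerExpand (dx dy : Int) (K : Nat) (a b : Int) (lst : List (Int × Int)) :
    (PySem.List.pyRange 0 (K : Int) 1).foldl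
        (fun (st : Int × Int × List (Int × Int)) _ =>
          (st.1 + dx, st.2.1 + dy, st.2.2 ++ [(st.1, st.2.1)]))
        (a, b, lst) =
      (a + K * dx, b + K * dy,
        lst ++ (List.range K).map (fun t : Nat => (a + (t : Int) * dx, b + (t : Int) * dy))) := by
  induction K generalizing lst with
  | zero => simp [PySem.List.pyRange_one_eq_nil]
  | succ K ih =>
    rw [show ((K + 1 : Nat) : Int) = (K : Int) + 1 by push_cast; ring,
      PySem.List.pyRange_one_succ_right (by positivity), List.foldl_append, ih]
    simp only [List.foldl_cons, List.foldl_nil, List.range_succ, List.map_append, List.map_cons,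
      List.map_nil]
    refine congrArg₂ Prod.mk (by push_cast; ring)
      (congrArg₂ Prod.mk (by push_cast; ring) (by simp [List.append_assoc]))

theorem pyRange_zero_toNat (KI : Int) :
    PySem.List.pyRange 0 KI 1 = PySem.List.pyRange 0 ((KI.toNat : Int)) 1 := by
  by_cases h : 0 ≤ KI
  · rw [Int.toNat_of_nonneg h]
  · rw [PySem.List.pyRange_one_eq_nil (by omega), PySem.List.pyRange_one_eq_nil (by omega)]

theorem walkB_char (board : List (List Int)) (opposite di dj : Int) :
    ∀ (fuel : Nat) (x y : Int) (flips : List (Int × Int)),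
      walkB board opposite di dj fuel x y flips =
        (flips ++ (List.range (stopAt board opposite di dj fuel x y)).map
            (fun t : Nat => (x + (t : Int) * di, y + (t : Int) * dj)),
          x + (stopAt board opposite di dj fuel x y) * di,
          y + (stopAt board opposite di dj fuel x y) * dj) := by
  intro fuel
  induction fuel with
  | zero => intro x y flips; simp [walkB, stopAt]
  | succ fuel ih =>
    intro x y flips
    rw [walkB, stopAt]
    split
    · rw [ih]
      have hr : ∀ s : Nat, (List.range (s + 1)).map
            (fun t : Nat => (x + (t : Int) * di, y + (t : Int) * dj)) =
          (x, y) :: (List.range s).map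
            (fun t : Nat => (x + di + (t : Int) * di, y + dj + (t : Int) * dj)) := by
        intro s
        rw [List.range_succ_eq_map]
        simp only [List.map_cons, List.map_map, Nat.cast_zero, zero_mul, add_zero]
        refine congrArg₂ List.cons rfl ?_
        apply List.map_congr_left
        intro t _
        simp only [Function.comp_apply]
        refine congrArg₂ Prod.mk (by push_cast; ring) (by push_cast; ring)
      refine congrArg₂ Prod.mk ?_
        (congrArg₂ Prod.mk (by push_cast; ring) (by push_cast; ring))
      rw [hr]
      simp [List.append_assoc]
    · simp [stopAt]

theorem whileA_stop (board : List (List Int)) (color opposite di dj z x y : Int)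
    (acc : List (Int × Int)) (fuel : Nat) (hz : z ≠ opposite) :
    whileA board color opposite di dj fuel z x y acc = acc := by
  cases fuel with
  | zero => rfl
  | succ fuel => rw [whileA]; simp [hz]

theorem whileA_char (board : List (List Int)) (color opposite di dj : Int)
    (hoc : opposite ≠ color) :
    ∀ (fuel : Nat) (x y : Int) (acc : List (Int × Int)),
      stopAt board opposite di dj fuel x y + 1 ≤ fuel →
      whileA board color opposite di dj fuel opposite x y acc =
        acc ++ tokIf board color
          (x + (stopAt board opposite di dj fuel x y) * di)
          (y + (stopAt board opposite di dj fuel x y) * dj) := by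
  intro fuel
  induction fuel with
  | zero => intro x y acc h; omega
  | succ fuel ih =>
    intro x y acc h
    rw [whileA, stopAt]
    by_cases hb : 0 ≤ x ∧ x < (board.length : Int) ∧ 0 ≤ y ∧ y < (board.length : Int)
    · by_cases hc : cellAt board x y = opposite
      · rw [if_pos ⟨rfl, hb⟩, if_pos ⟨hb, hc⟩]
        simp only [hc, if_neg hoc]
        rw [ih (x + di) (y + dj) acc (by rw [stopAt, if_pos ⟨hb, hc⟩] at h; omega)]
        exact congrArg (acc ++ ·)
          (congrArg₂ (tokIf board color) (by push_cast; ring) (by push_cast; ring))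
      · rw [if_pos ⟨rfl, hb⟩, if_neg (fun hh => hc hh.2)]
        simp only
        rw [whileA_stop _ _ _ _ _ _ _ _ _ _ hc, tokIf]
        simp only [Nat.cast_zero, zero_mul, add_zero]
        by_cases hcol : cellAt board x y = color
        · rw [if_pos hcol, if_pos ⟨hb, hcol⟩]
        · rw [if_neg hcol, if_neg (fun hh => hcol hh.2), List.append_nil]
    · rw [if_neg (fun hh => hb hh.2), if_neg (fun hh => hb hh.1), tokIf]
      simp only [Nat.cast_zero, zero_mul, add_zero]
      rw [if_neg (fun hh => hb hh.1), List.append_nil]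

theorem stop_aux_e (board : List (List Int)) (o dj : Int) (de : Int) (hde : de = 1 ∨ de = -1) :
    ∀ (fuel : Nat) (x y : Int), ((stopAt board o de dj fuel x y : Int)) ≤
      if 0 ≤ x ∧ x < (board.length : Int) then
        (if de = 1 then (board.length : Int) - x else x + 1) else 0 := by
  intro fuel
  induction fuel with
  | zero =>
    intro x y
    rw [stopAt]
    split
    · rcases hde with rfl | rfl <;> simp <;> omega
    · simp
  | succ fuel ih =>
    intro x y
    rw [stopAt]
    split
    · rename_i hg
      have h2 := ih (x + de) (y + dj)
      rw [if_pos ⟨hg.1.1, hg.1.2.1⟩]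
      have hx0 := hg.1.1
      have hx1 := hg.1.2.1
      rcases hde with rfl | rfl <;> simp only [if_pos rfl] at * <;>
        split at h2 <;> push_cast at h2 ⊢ <;> omega
    · split
      · rcases hde with rfl | rfl <;> simp <;> omega
      · simp

theorem stop_aux_y (board : List (List Int)) (o di : Int) (de : Int) (hde : de = 1 ∨ de = -1) :
    ∀ (fuel : Nat) (x y : Int), ((stopAt board o di de fuel x y : Int)) ≤
      if 0 ≤ y ∧ y < (board.length : Int) then
        (if de = 1 then (board.length : Int) - y else y + 1) else 0 := by
  intro fuel
  induction fuel with
  | zero =>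
    intro x y
    rw [stopAt]
    split
    · rcases hde with rfl | rfl <;> simp <;> omega
    · simp
  | succ fuel ih =>
    intro x y
    rw [stopAt]
    split
    · rename_i hg
      have h2 := ih (x + di) (y + de)
      rw [if_pos ⟨hg.1.2.2.1, hg.1.2.2.2⟩]
      have hy0 := hg.1.2.2.1
      have hy1 := hg.1.2.2.2
      rcases hde with rfl | rfl <;> simp only [if_pos rfl] at * <;>
        split at h2 <;> push_cast at h2 ⊢ <;> omega
    · split
      · rcases hde with rfl | rfl <;> simp <;> omega
      · simp

theorem stop_le (board : List (List Int)) (opposite di dj : Int)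
    (hdi : di = -1 ∨ di = 0 ∨ di = 1) (hdj : dj = -1 ∨ dj = 0 ∨ dj = 1)
    (hne : ¬(di = 0 ∧ dj = 0)) (fuel : Nat) (x y : Int) :
    stopAt board opposite di dj fuel x y ≤ board.length := by
  rcases hdi with rfl | rfl | rfl
  · have h := stop_aux_e board opposite dj (-1) (Or.inr rfl) fuel x y
    split at h <;> simp at h <;> omega
  · rcases hdj with rfl | rfl | rfl
    · have h := stop_aux_y board opposite 0 (-1) (Or.inr rfl) fuel x y
      split at h <;> simp at h <;> omega
    · exact absurd ⟨rfl, rfl⟩ hne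
    · have h := stop_aux_y board opposite 0 1 (Or.inl rfl) fuel x y
      split at h <;> simp at h <;> omega
  · have h := stop_aux_e board opposite dj 1 (Or.inl rfl) fuel x y
    split at h <;> simp at h <;> omega

theorem range3 (a n : Int) :
    PySem.List.pyRange (max 0 (a - 1)) (min (a + 2) n) 1 =
      (([-1, 0, 1] : List Int).map (fun d => a + d)).filter
        (fun x => decide (0 ≤ x ∧ x < n)) := by
  have hL := PySem.List.pairwise_lt_pyRange_one (max 0 (a - 1)) (min (a + 2) n)
  have hR : ((([-1, 0, 1] : List Int).map (fun d => a + d)).filter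
      (fun x => decide (0 ≤ x ∧ x < n))).Pairwise (· < ·) := by
    apply List.Pairwise.filter
    simp [List.pairwise_cons]
  have hmem : ∀ x, x ∈ PySem.List.pyRange (max 0 (a - 1)) (min (a + 2) n) 1 ↔
      x ∈ (([-1, 0, 1] : List Int).map (fun d => a + d)).filter
        (fun x => decide (0 ≤ x ∧ x < n)) := by
    intro x
    rw [PySem.List.mem_pyRange_one]
    simp [List.mem_filter]
    omega
  exact ((List.perm_ext_iff_of_nodup (hL.imp ne_of_lt) (hR.imp ne_of_lt)).mpr
      hmem).eq_of_pairwise (fun a b _ _ h1 h2 => absurd h2 (lt_asymm h1)) hL hR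



theorem map_filter_ite {α β : Type} (p : α → Bool) (f : α → β) (l : List α) :
    (l.filter p).map f = l.flatMap (fun x => if p x then [f x] else []) := by
  induction l with
  | nil => rfl
  | cons a l ih => by_cases h : p a <;> simp [List.filter_cons, h, ih]

-- the neighbor A's 3×3 scan records for offset (di, dj)
def nbhd (board : List (List Int)) (row col color di dj : Int) : List (Int × Int × Int × Int) :=
  if (0 ≤ row + di ∧ row + di < (board.length : Int) ∧ 0 ≤ col + dj ∧
        col + dj < (board.length : Int)) ∧
      cellAt board (row + di) (col + dj) = (if color = 1 then 2 else 1) then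
    [(row + di, col + dj, di, dj)]
  else []

theorem flatMap_ite_singleton {α β : Type} (c : Prop) [Decidable c] (v : α) (g : α → List β) :
    (if c then [v] else []).flatMap g = if c then g v else [] := by
  split <;> simp

theorem ite_flatMap {α β : Type} (c : Prop) [Decidable c] (l : List α) (g : α → List β) :
    (if c then l.flatMap g else []) = l.flatMap (fun x => if c then g x else []) := by
  split <;> simp

theorem ite_ite_push {α : Type} (c d : Prop) [Decidable c] [Decidable d] (v w : List α) :
    (if c then (if d then v else w) else w) = if c ∧ d then v else w := by
  split_ifs <;> tauto

theorem neighbors_eq (board : List (List Int)) (row col color : Int) :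
    findopponentneighbors board row col color =
      ([-1, 0, 1] : List Int).flatMap (fun di =>
        ([-1, 0, 1] : List Int).flatMap (fun dj => nbhd board row col color di dj)) := by
  unfold findopponentneighbors
  simp only [PySem.List.foldl_append_ite, PySem.List.foldl_append_eq_flatMap, List.nil_append]
  rw [range3 row, range3 col]
  simp only [List.filter_map, map_filter_ite]
  rw [List.flatMap_assoc]
  congr 1
  funext di
  rw [flatMap_ite_singleton, ite_flatMap, List.flatMap_assoc]
  congr 1
  funext dj
  rw [flatMap_ite_singleton, ite_ite_push]
  simp only [decide_eq_true_eq, Function.comp_apply, nbhd]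
  split_ifs <;> first | rfl | tauto | simp

theorem whileA_acc (board : List (List Int)) (color opposite di dj : Int) :
    ∀ (fuel : Nat) (z x y : Int) (acc : List (Int × Int)),
      whileA board color opposite di dj fuel z x y acc =
        acc ++ whileA board color opposite di dj fuel z x y [] := by
  intro fuel
  induction fuel with
  | zero => intro z x y acc; simp [whileA]
  | succ fuel ih =>
    intro z x y acc
    rw [whileA, whileA]
    split
    · rw [ih (cellAt board x y) (x + di) (y + dj)
        (if cellAt board x y = color then acc ++ [(x, y)] else acc)]
      show _ = acc ++ whileA board color opposite di dj fuel (cellAt board x y) (x + di) (y + dj)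
        (if cellAt board x y = color then [] ++ [(x, y)] else [])
      rw [ih (cellAt board x y) (x + di) (y + dj)
        (if cellAt board x y = color then [] ++ [(x, y)] else [])]
      split <;> simp
    · simp

theorem tokens_eq (board : List (List Int)) (row col color : Int) :
    findsamecolorinline board row col color =
      (findopponentneighbors board row col color).flatMap (fun nb =>
        whileA board color (if color = 1 then 2 else 1) nb.2.2.1 nb.2.2.2
          (board.length + 1) (if color = 1 then 2 else 1) nb.1 nb.2.1 []) := by
  unfold findsamecolorinline
  rw [PySem.List.foldl_pyRange_zero_pyGetD' (findopponentneighbors board row col color)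
    ((0, 0, 0, 0) : Int × Int × Int × Int)
    (fun tokens nb => whileA board color (if color = 1 then 2 else 1) nb.2.2.1 nb.2.2.2
      (board.length + 1) (if color = 1 then 2 else 1) nb.1 nb.2.1 tokens) []]
  rw [show (fun (tokens : List (Int × Int)) (nb : Int × Int × Int × Int) =>
      whileA board color (if color = 1 then 2 else 1) nb.2.2.1 nb.2.2.2
        (board.length + 1) (if color = 1 then 2 else 1) nb.1 nb.2.1 tokens) =
      (fun tokens nb => tokens ++ whileA board color (if color = 1 then 2 else 1) nb.2.2.1
        nb.2.2.2 (board.length + 1) (if color = 1 then 2 else 1) nb.1 nb.2.1 []) from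
    funext fun tokens => funext fun nb => whileA_acc _ _ _ _ _ _ _ _ _ _]
  rw [PySem.List.foldl_append_eq_flatMap]
  rfl

theorem A_eq (board : List (List Int)) (row col color : Int) :
    placements board row col color =
      [(row, col)] ++ ([-1, 0, 1] : List Int).flatMap (fun di =>
        ([-1, 0, 1] : List Int).flatMap (fun dj =>
          (nbhd board row col color di dj).flatMap (fun nb =>
            (whileA board color (if color = 1 then 2 else 1) nb.2.2.1 nb.2.2.2
              (board.length + 1) (if color = 1 then 2 else 1) nb.1 nb.2.1 []).flatMap
              (expandE row col)))) := by
  unfold placements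
  rw [PySem.List.foldl_pyRange_zero_pyGetD' (findsamecolorinline board row col color)
    ((0, 0) : Int × Int)
    (fun mylist t =>
      ((PySem.List.pyRange 0 (max |t.1 - row| |t.2 - col| - 1) 1).foldl
          (fun (st : Int × Int × List (Int × Int)) _ =>
            (st.1 + Int.tdiv (t.1 - row) (max |t.1 - row| |t.2 - col|),
              st.2.1 + Int.tdiv (t.2 - col) (max |t.1 - row| |t.2 - col|),
              st.2.2 ++ [(st.1, st.2.1)]))
          (row + Int.tdiv (t.1 - row) (max |t.1 - row| |t.2 - col|),
            col + Int.tdiv (t.2 - col) (max |t.1 - row| |t.2 - col|), mylist)).2.2) [(row, col)]]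
  rw [show (fun (mylist : List (Int × Int)) (t : Int × Int) =>
      ((PySem.List.pyRange 0 (max |t.1 - row| |t.2 - col| - 1) 1).foldl
          (fun (st : Int × Int × List (Int × Int)) _ =>
            (st.1 + Int.tdiv (t.1 - row) (max |t.1 - row| |t.2 - col|),
              st.2.1 + Int.tdiv (t.2 - col) (max |t.1 - row| |t.2 - col|),
              st.2.2 ++ [(st.1, st.2.1)]))
          (row + Int.tdiv (t.1 - row) (max |t.1 - row| |t.2 - col|),
            col + Int.tdiv (t.2 - col) (max |t.1 - row| |t.2 - col|), mylist)).2.2) =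
      (fun mylist t => mylist ++ expandE row col t) from
    funext fun mylist => funext fun t => by
      rw [pyRange_zero_toNat, innerExpand]; rfl]
  rw [PySem.List.foldl_append_eq_flatMap, tokens_eq, neighbors_eq]
  simp only [List.flatMap_assoc]

-- B's contribution for one direction offset
def contribB (board : List (List Int)) (row col color : Int) (d : Int × Int) :
    List (Int × Int) :=
  let r := walkB board (if color = 1 then 2 else 1) d.1 d.2 (board.length + 1)
    (row + d.1) (col + d.2) []
  if (0 ≤ r.2.1 ∧ r.2.1 < (board.length : Int) ∧ 0 ≤ r.2.2 ∧ r.2.2 < (board.length : Int)) ∧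
      cellAt board r.2.1 r.2.2 = color then r.1 else []

theorem B_eq (board : List (List Int)) (row col color : Int) :
    placements_alt board row col color =
      [(row, col)] ++ offsetsB.flatMap (contribB board row col color) := by
  show offsetsB.foldl
      (fun result d =>
        let r := walkB board (if color = 1 then 2 else 1) d.1 d.2 (board.length + 1)
          (row + d.1) (col + d.2) []
        if (0 ≤ r.2.1 ∧ r.2.1 < (board.length : Int) ∧ 0 ≤ r.2.2 ∧
            r.2.2 < (board.length : Int)) ∧ cellAt board r.2.1 r.2.2 = color then
          result ++ r.1
        else result) [(row, col)] = _
  rw [show (fun (result : List (Int × Int)) (d : Int × Int) =>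
      let r := walkB board (if color = 1 then 2 else 1) d.1 d.2 (board.length + 1)
        (row + d.1) (col + d.2) []
      if (0 ≤ r.2.1 ∧ r.2.1 < (board.length : Int) ∧ 0 ≤ r.2.2 ∧
          r.2.2 < (board.length : Int)) ∧ cellAt board r.2.1 r.2.2 = color then
        result ++ r.1
      else result) = (fun result d => result ++ contribB board row col color d) from
    funext fun result => funext fun d => by
      simp only [contribB]
      split_ifs <;> simp]
  rw [PySem.List.foldl_append_eq_flatMap]

theorem expandE_ray (row col di dj : Int) (s : Nat)
    (hdi : di = -1 ∨ di = 0 ∨ di = 1) (hdj : dj = -1 ∨ dj = 0 ∨ dj = 1)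
    (hne : ¬(di = 0 ∧ dj = 0)) :
    expandE row col (row + di + (s : Int) * di, col + dj + (s : Int) * dj) =
      (List.range s).map
        (fun t : Nat => (row + di + (t : Int) * di, col + dj + (t : Int) * dj)) := by
  have hmax : max |di| |dj| = 1 := by
    rcases hdi with rfl | rfl | rfl <;> rcases hdj with rfl | rfl | rfl <;>
      first | (exact absurd ⟨rfl, rfl⟩ hne) | decide
  have hx : row + di + (s : Int) * di - row = ((s : Int) + 1) * di := by ring
  have hy : col + dj + (s : Int) * dj - col = ((s : Int) + 1) * dj := by ring
  have hM : max |((s : Int) + 1) * di| |((s : Int) + 1) * dj| = (s : Int) + 1 := by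
    rw [abs_mul, abs_mul, abs_of_nonneg (by positivity : (0 : Int) ≤ (s : Int) + 1),
      ← mul_max_of_nonneg _ _ (by positivity : (0 : Int) ≤ (s : Int) + 1), hmax, mul_one]
  simp only [expandE, hx, hy, hM]
  rw [Int.mul_tdiv_cancel_left _ (by positivity : ((s : Int) + 1) ≠ 0),
    Int.mul_tdiv_cancel_left _ (by positivity : ((s : Int) + 1) ≠ 0)]
  norm_num

theorem dir_lemma (board : List (List Int)) (row col color di dj : Int)
    (hdi : di = -1 ∨ di = 0 ∨ di = 1) (hdj : dj = -1 ∨ dj = 0 ∨ dj = 1)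
    (hne : ¬(di = 0 ∧ dj = 0)) :
    (nbhd board row col color di dj).flatMap (fun nb =>
        (whileA board color (if color = 1 then 2 else 1) nb.2.2.1 nb.2.2.2
          (board.length + 1) (if color = 1 then 2 else 1) nb.1 nb.2.1 []).flatMap
          (expandE row col)) =
      contribB board row col color (di, dj) := by
  have hoc : (if color = 1 then (2 : Int) else 1) ≠ color := by split <;> omega
  rw [nbhd, contribB]
  simp only [walkB_char]
  by_cases hc : (0 ≤ row + di ∧ row + di < (board.length : Int) ∧ 0 ≤ col + dj ∧
      col + dj < (board.length : Int)) ∧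
      cellAt board (row + di) (col + dj) = (if color = 1 then 2 else 1)
  · rw [if_pos hc]
    simp only [List.flatMap_cons, List.flatMap_nil, List.append_nil]
    rw [whileA_char board color (if color = 1 then 2 else 1) di dj hoc (board.length + 1)
      (row + di) (col + dj) []
      (by
        have := stop_le board (if color = 1 then 2 else 1) di dj hdi hdj hne
          (board.length + 1) (row + di) (col + dj)
        omega)]
    rw [tokIf, List.nil_append]
    by_cases hend : (0 ≤ row + di +
          (stopAt board (if color = 1 then 2 else 1) di dj (board.length + 1)
            (row + di) (col + dj) : Int) * di ∧
        row + di + (stopAt board (if color = 1 then 2 else 1) di dj (board.length + 1)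
            (row + di) (col + dj) : Int) * di < (board.length : Int) ∧
        0 ≤ col + dj + (stopAt board (if color = 1 then 2 else 1) di dj (board.length + 1)
            (row + di) (col + dj) : Int) * dj ∧
        col + dj + (stopAt board (if color = 1 then 2 else 1) di dj (board.length + 1)
            (row + di) (col + dj) : Int) * dj < (board.length : Int)) ∧
        cellAt board
          (row + di + (stopAt board (if color = 1 then 2 else 1) di dj (board.length + 1)
            (row + di) (col + dj) : Int) * di)
          (col + dj + (stopAt board (if color = 1 then 2 else 1) di dj (board.length + 1)
            (row + di) (col + dj) : Int) * dj) = color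
    · rw [if_pos hend, if_pos hend]
      simp only [List.flatMap_cons, List.flatMap_nil, List.append_nil, List.nil_append]
      exact expandE_ray row col di dj _ hdi hdj hne
    · rw [if_neg hend, if_neg hend]
      simp
  · rw [if_neg hc]
    have hs : stopAt board (if color = 1 then 2 else 1) di dj (board.length + 1)
        (row + di) (col + dj) = 0 := by
      rw [stopAt, if_neg hc]
    rw [hs]
    simp

-- ===== VERDICT (by name: the statement is the Claim_ definition above) =====
theorem placements_spec : Claim_equal_placements := by
  intro board row col color hdom hpre
  unfold Spec_placements
  rw [A_eq, B_eq]
  congr 1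
  have hcenter : nbhd board row col color 0 0 = [] := by
    rw [nbhd, if_neg]
    intro hh
    exact hpre.1 ⟨by simpa using hh.1.1, by simpa using hh.1.2.1, by simpa using hh.1.2.2.1,
      by simpa using hh.1.2.2.2, by simpa using hh.2⟩
  simp only [List.flatMap_cons, List.flatMap_nil, List.append_nil, hcenter, offsetsB]
  rw [dir_lemma board row col color (-1) (-1) (by norm_num) (by norm_num) (by norm_num),
    dir_lemma board row col color (-1) 0 (by norm_num) (by norm_num) (by norm_num),
    dir_lemma board row col color (-1) 1 (by norm_num) (by norm_num) (by norm_num),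
    dir_lemma board row col color 0 (-1) (by norm_num) (by norm_num) (by norm_num),
    dir_lemma board row col color 0 1 (by norm_num) (by norm_num) (by norm_num),
    dir_lemma board row col color 1 (-1) (by norm_num) (by norm_num) (by norm_num),
    dir_lemma board row col color 1 0 (by norm_num) (by norm_num) (by norm_num),
    dir_lemma board row col color 1 1 (by norm_num) (by norm_num) (by norm_num)]
  simp
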